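-- pv_equiv track=rewrite | github.com/holzerjm/vLLM-hackathon | demo/nemoclaw-agent/tools/knowledge_base.py | search
-- ===== SOURCE A (Python) =====
-- from typing import List, Dict
--
-- KB_ENTRIES: List[Dict[str, str]] = [
--     {
--         "id": "kb-001",
--         "title": "How to reset your password",
--         "content": "Visit /account/reset and enter the email tied to your account. "
--                    "You will receive a reset link within 5 minutes. The link expires in 24h.",
--     },
--     {
--         "id": "kb-002",
--         "title": "Shipping times and tracking",
--         "content": "Standard shipping is 3-5 business days. Express is 1-2 days. "
--                    "Track your order at /orders/{order_id} or via the email confirmation.",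
--     },
--     {
--         "id": "kb-003",
--         "title": "Return policy",
--         "content": "Returns are accepted within 30 days of delivery. "
--                    "Items must be unworn and in original packaging. "
--                    "Initiate a return from the order page; refunds process within 7 days.",
--     },
--     {
--         "id": "kb-004",
--         "title": "Subscription management",
--         "content": "Manage your subscription at /account/subscriptions. "
--                    "Cancel anytime; no cancellation fee. Refunds are prorated.",
--     },
--     {
--         "id": "kb-005",
--         "title": "International shipping",
--         "content": "We ship to 45 countries. Customs and duties are the buyer's responsibility. "
--                    "Delivery times vary: 7-14 business days for most regions.",
--     },
-- ]
--
-- def search(query: str, limit: int = 3) -> List[Dict[str, str]]: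
--     """
--     Search the knowledge base.
--
--     Naive keyword match — in production use semantic search with an embedding
--     model served by vLLM or a dedicated embedding backend.
--     """
--     query_terms = [t.lower() for t in query.split() if len(t) > 2]
--     scored = []
--     for entry in KB_ENTRIES:
--         blob = (entry["title"] + " " + entry["content"]).lower()
--         score = sum(1 for term in query_terms if term in blob)
--         if score > 0:
--             scored.append((score, entry))
--     scored.sort(key=lambda x: -x[0])
--     return [entry for _, entry in scored[:limit]]
-- ===== SOURCE B (Python) =====
-- from typing import List, Dict
--
-- KB_ENTRIES: List[Dict[str, str]] = [
--     {
--         "id": "kb-001",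
--         "title": "How to reset your password",
--         "content": "Visit /account/reset and enter the email tied to your account. "
--                    "You will receive a reset link within 5 minutes. The link expires in 24h.",
--     },
--     {
--         "id": "kb-002",
--         "title": "Shipping times and tracking",
--         "content": "Standard shipping is 3-5 business days. Express is 1-2 days. "
--                    "Track your order at /orders/{order_id} or via the email confirmation.",
--     },
--     {
--         "id": "kb-003",
--         "title": "Return policy",
--         "content": "Returns are accepted within 30 days of delivery. "
--                    "Items must be unworn and in original packaging. "
--                    "Initiate a return from the order page; refunds process within 7 days.",
--     },
--     {
--         "id": "kb-004",
--         "title": "Subscription management",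
--         "content": "Manage your subscription at /account/subscriptions. "
--                    "Cancel anytime; no cancellation fee. Refunds are prorated.",
--     },
--     {
--         "id": "kb-005",
--         "title": "International shipping",
--         "content": "We ship to 45 countries. Customs and duties are the buyer's responsibility. "
--                    "Delivery times vary: 7-14 business days for most regions.",
--     },
-- ]
--
--
-- def _score(terms: List[str], entry: Dict[str, str]) -> int:
--     blob = (entry["title"] + " " + entry["content"]).lower()
--     return sum(1 for t in terms if t in blob)
--
--
-- def search(query: str, limit: int = 3) -> List[Dict[str, str]]:
--     """Sort-free selection ranking: for each possible score from the maximum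
--     (number of query terms) down to 1, scan the KB and emit entries with
--     exactly that score; finally slice to the limit."""
--     terms = [t.lower() for t in query.split() if len(t) > 2]
--     out: List[Dict[str, str]] = []
--     for s in range(len(terms), 0, -1):
--         for entry in KB_ENTRIES:
--             if _score(terms, entry) == s:
--                 out.append(entry)
--     return out[:limit]
-- ===== Notes on version B (the rewrite author's own statement) =====
-- stated objective: alternative
-- what changed: Replaces scoring-then-comparison-sorting by a sort-free selection pass: for each possible score from len(query_terms) down to 1, B rescans the KB and emits the entries with exactly that score, then slices to the limit; no sorted list of (score, entry) pairs is ever built.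
import Mathlib
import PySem

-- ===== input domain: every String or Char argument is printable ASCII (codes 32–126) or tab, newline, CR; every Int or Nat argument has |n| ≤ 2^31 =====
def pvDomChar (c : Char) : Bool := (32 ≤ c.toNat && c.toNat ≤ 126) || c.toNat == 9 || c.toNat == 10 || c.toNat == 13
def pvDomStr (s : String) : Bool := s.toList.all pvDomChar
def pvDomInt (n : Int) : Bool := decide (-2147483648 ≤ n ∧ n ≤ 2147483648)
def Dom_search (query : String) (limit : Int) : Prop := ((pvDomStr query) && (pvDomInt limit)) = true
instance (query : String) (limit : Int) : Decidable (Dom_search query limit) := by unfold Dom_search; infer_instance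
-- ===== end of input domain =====

-- B replaces A's score-and-comparison-sort by a sort-free selection pass (scan per score, max down to 1); objective: alternative.

-- the module-level KB_ENTRIES constant (shared by both Pythons)
def kbEntries : List (List (String × String)) := [
  [("id", "kb-001"), ("title", "How to reset your password"),
   ("content", "Visit /account/reset and enter the email tied to your account. You will receive a reset link within 5 minutes. The link expires in 24h.")],
  [("id", "kb-002"), ("title", "Shipping times and tracking"),
   ("content", "Standard shipping is 3-5 business days. Express is 1-2 days. Track your order at /orders/{order_id} or via the email confirmation.")],
  [("id", "kb-003"), ("title", "Return policy"),
   ("content", "Returns are accepted within 30 days of delivery. Items must be unworn and in original packaging. Initiate a return from the order page; refunds process within 7 days.")],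
  [("id", "kb-004"), ("title", "Subscription management"),
   ("content", "Manage your subscription at /account/subscriptions. Cancel anytime; no cancellation fee. Refunds are prorated.")],
  [("id", "kb-005"), ("title", "International shipping"),
   ("content", "We ship to 45 countries. Customs and duties are the buyer's responsibility. Delivery times vary: 7-14 business days for most regions.")]]

-- ===== PORT A =====
-- [t.lower() for t in query.split() if len(t) > 2]
def pvTerms (query : String) : List String :=
  ((PySem.Str.split₀ query).filter (fun t => decide (2 < PySem.Str.len t))).map PySem.Str.lower

-- (entry["title"] + " " + entry["content"]).lower()  — getD "" never defaults: both keys are present in every fixed KB entry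
def pvBlob (e : List (String × String)) : String :=
  PySem.Str.lower (((PySem.Dict.mk e).getD "title" "") ++ " " ++ ((PySem.Dict.mk e).getD "content" ""))

-- score = sum(1 for term in query_terms if term in blob)
def pvScore (terms : List String) (e : List (String × String)) : Int :=
  terms.foldl (fun acc term => if PySem.Str.isIn term (pvBlob e) then acc + 1 else acc) 0

def search (query : String) (limit : Int) : List (List (String × String)) :=
  let queryTerms := pvTerms query
  let scored := kbEntries.foldl (fun acc entry =>
      let score := pvScore queryTerms entry
      if 0 < score then acc ++ [(score, entry)] else acc) []
  let scoredSorted := PySem.List.sorted scored (fun x => -x.1) false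
  (PySem.List.slice scoredSorted none (some limit)).map (·.2)

-- ===== PORT B =====
-- Source B helper _score(terms, entry)
def altScore (terms : List String) (entry : List (String × String)) : Int :=
  let blob := PySem.Str.lower (((PySem.Dict.mk entry).getD "title" "") ++ " " ++ ((PySem.Dict.mk entry).getD "content" ""))
  terms.foldl (fun acc t => if PySem.Str.isIn t blob then acc + 1 else acc) 0

def search_alt (query : String) (limit : Int) : List (List (String × String)) :=
  let terms := ((PySem.Str.split₀ query).filter (fun t => decide (2 < PySem.Str.len t))).map PySem.Str.lower
  let out := (PySem.List.pyRange (terms.length : Int) 0 (-1)).foldl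
      (fun out s => kbEntries.foldl
        (fun out entry => if altScore terms entry == s then out ++ [entry] else out) out) []
  PySem.List.slice out none (some limit)

-- ===== PRECONDITION & SPEC =====
def Spec_search (query : String) (limit : Int) (out : List (List (String × String))) : Prop := out = search_alt query limit
instance (query : String) (limit : Int) (out : List (List (String × String))) : Decidable (Spec_search query limit out) := by unfold Spec_search; infer_instance

-- ===== CLAIM (what is proved, stated in full; the proofs are below) =====
def Claim_equal_search : Prop := ∀ (query : String) (limit : Int), Dom_search query limit → Spec_search query limit (search query limit)

-- ===== LEMMAS AND PROOFS =====

theorem alt_score_eq : altScore = pvScore := rfl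

-- a conditional accumulate-fold is the plain fold over the filtered-and-mapped list
theorem pv_foldl_if_eq {α β γ : Type} (p : α → Prop) [DecidablePred p] (f : α → β)
    (g : γ → β → γ) (l : List α) (d0 : γ) :
    l.foldl (fun d e => if p e then g d (f e) else d) d0
      = ((l.filter (fun e => decide (p e))).map f).foldl g d0 := by
  induction l generalizing d0 with
  | nil => rfl
  | cons x xs ih =>
    by_cases hx : p x <;> simp [hx, ih]

theorem pv_foldl_snoc {α : Type} (l : List α) (a : List α) :
    l.foldl (fun acc x => acc ++ [x]) a = a ++ l := by
  induction l generalizing a with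
  | nil => simp
  | cons x xs ih => simp [ih]

-- B's inner scan collects, in KB order, the entries with exactly the given score
theorem pv_foldl_select {α : Type} (p : α → Bool) (l : List α) (acc : List α) :
    l.foldl (fun a x => if p x then a ++ [x] else a) acc = acc ++ l.filter p := by
  induction l generalizing acc with
  | nil => simp
  | cons x xs ih => by_cases h : p x <;> simp [h, ih]

theorem pv_insertBy_skip {E : Type} (before : E → E → Bool) (x : E) (ys zs : List E)
    (h : ∀ y ∈ ys, before x y = false) :
    PySem.List.insertBy before x (ys ++ zs) = ys ++ PySem.List.insertBy before x zs := by
  induction ys with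
  | nil => simp
  | cons y ys ih =>
    simp only [List.cons_append, PySem.List.insertBy, h y (by simp)]
    simp [ih (fun y hy => h y (by simp [hy]))]

theorem pv_insertBy_front {E : Type} (before : E → E → Bool) (x : E) (ys : List E)
    (h : ∀ y ∈ ys, before x y = true) :
    PySem.List.insertBy before x ys = x :: ys := by
  cases ys with
  | nil => rfl
  | cons y ys => simp [PySem.List.insertBy, h y (by simp)]

-- inserting one pair into a bucket layout (strictly descending values vs, x's value in vs)
theorem pv_insertBy_buckets {E : Type} (x : Int × E) (vs : List Int) (l : List (Int × E))
    (hvs : vs.Pairwise (fun a b => b < a)) (hx : x.1 ∈ vs) :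
    PySem.List.insertBy (fun a b => decide ((fun y : Int × E => -y.1) a < (fun y : Int × E => -y.1) b)) x
        (vs.flatMap (fun v => l.filter (fun p => p.1 == v)))
      = vs.flatMap (fun v => (l ++ [x]).filter (fun p => p.1 == v)) := by
  induction vs with
  | nil => simp at hx
  | cons v vs ih =>
    rcases List.pairwise_cons.mp hvs with ⟨hvlt, hvs'⟩
    have hskip : ∀ y ∈ l.filter (fun p => p.1 == v),
        (decide ((fun y : Int × E => -y.1) x < (fun y : Int × E => -y.1) y)) = false := by
      intro y hy
      have : y.1 = v := by simpa using (List.of_mem_filter hy)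
      rcases List.mem_cons.mp hx with hxv | hxvs
      · simp [this, hxv]
      · have hlt : x.1 < v := hvlt _ hxvs
        simp only [decide_eq_false_iff_not, not_lt]
        omega
    rcases List.mem_cons.mp hx with hxv | hxvs
    · -- x belongs to the head bucket
      have hnot : ∀ v' ∈ vs, ¬ (x.1 == v') = true := by
        intro v' hv'
        have := hvlt v' hv'
        simp only [beq_iff_eq]
        omega
      have hfront : ∀ y ∈ vs.flatMap (fun v => l.filter (fun p => p.1 == v)),
          (decide ((fun y : Int × E => -y.1) x < (fun y : Int × E => -y.1) y)) = true := by
        intro y hy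
        rcases List.mem_flatMap.mp hy with ⟨v', hv', hyf⟩
        have hy1 : y.1 = v' := by simpa using (List.of_mem_filter hyf)
        have := hvlt v' hv'
        simp only [decide_eq_true_eq]
        omega
      have htail : vs.flatMap (fun v => (l ++ [x]).filter (fun p => p.1 == v))
          = vs.flatMap (fun v => l.filter (fun p => p.1 == v)) := by
        apply List.flatMap_congr
        intro v' hv'
        simp only [List.filter_append, List.filter_cons, List.filter_nil]
        have := hnot v' hv'
        simp [this]
      simp only [List.flatMap_cons]
      rw [pv_insertBy_skip _ _ _ _ hskip, pv_insertBy_front _ _ _ hfront, htail]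
      simp [List.filter_append, hxv]
    · -- x belongs to a later bucket
      have hxnev : ¬ (x.1 == v) = true := by
        have := hvlt _ hxvs
        simp only [beq_iff_eq]; omega
      simp only [List.flatMap_cons]
      rw [pv_insertBy_skip _ _ _ _ hskip, ih hvs' hxvs]
      have : (l ++ [x]).filter (fun p => p.1 == v) = l.filter (fun p => p.1 == v) := by
        simp [List.filter_append, hxnev]
      rw [this]

-- stable descending sort = buckets read in strictly descending value order
theorem pv_sorted_eq_buckets {E : Type} (l : List (Int × E)) (vs : List Int)
    (hvs : vs.Pairwise (fun a b => b < a)) (hmem : ∀ p ∈ l, p.1 ∈ vs) :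
    PySem.List.sorted l (fun x => -x.1) false
      = vs.flatMap (fun v => l.filter (fun p => p.1 == v)) := by
  rw [PySem.List.sorted_eq_foldl_insertBy]
  induction l using List.reverseRecOn with
  | nil => simp
  | append_singleton l x ih =>
    rw [List.foldl_append, List.foldl_cons, List.foldl_nil,
        ih (fun p hp => hmem p (by simp [hp]))]
    exact pv_insertBy_buckets x vs l hvs (hmem x (by simp))

-- one score bucket of A's scored list, projected to entries, is B's selection scan of the KB
theorem pv_bucket_eq_select {α : Type} (sc : α → Int) (s : Int) (hs : 0 < s) (l : List α) :
    (((l.filter (fun e => decide (0 < sc e))).map (fun e => (sc e, e))).filter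
        (fun p => p.1 == s)).map (·.2)
      = l.filter (fun e => sc e == s) := by
  induction l with
  | nil => rfl
  | cons x xs ih =>
    by_cases h : sc x = s
    · have h0 : 0 < sc x := by omega
      simp [h, hs, ih]
    · by_cases h0 : 0 < sc x <;> simp [h, h0, ih]

theorem pv_slice_map {α β : Type} (f : α → β) (xs : List α) (b : Int) :
    PySem.List.slice (xs.map f) none (some b) = (PySem.List.slice xs none (some b)).map f := by
  simp [PySem.List.slice, List.map_take]

theorem pv_score_nonneg_le (terms : List String) (e : List (String × String)) :
    0 ≤ pvScore terms e ∧ pvScore terms e ≤ (terms.length : Int) := by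
  unfold pvScore
  rw [PySem.List.foldl_if_add_one]
  have := List.countP_le_length (l := terms) (p := fun t => PySem.Str.isIn t (pvBlob e))
  constructor <;> [positivity; exact_mod_cast by omega]

-- ===== VERDICT (by name: the statement is the Claim_ definition above) =====
set_option maxHeartbeats 1000000 in
theorem search_spec : Claim_equal_search := by
  intro query limit _
  unfold Spec_search search search_alt
  rw [alt_score_eq]
  dsimp only
  set terms := pvTerms query with hterms
  set sc := fun e => pvScore terms e with hsc
  set vs := PySem.List.pyRange (terms.length : Int) 0 (-1) with hvs
  -- A's scored list as a filter-map
  rw [pv_foldl_if_eq (fun e => 0 < sc e) (fun e => (sc e, e)) (fun acc x => acc ++ [x])]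
  rw [pv_foldl_snoc, List.nil_append]
  set scored := ((kbEntries.filter fun e => decide (0 < sc e)).map fun e => (sc e, e))
    with hscored
  -- B's nested loops as a flatMap of selection scans
  simp only [pv_foldl_select]
  rw [PySem.List.foldl_append_eq_flatMap, List.nil_append]
  -- the sorted list is the bucket layout over vs
  have hdesc : vs.Pairwise (fun a b => b < a) := by
    rw [hvs, PySem.List.pyRange_neg_one_eq_reverse, List.pairwise_reverse]
    exact PySem.List.pairwise_lt_pyRange_one 1 ((terms.length : Int) + 1)
  have hmem : ∀ p ∈ scored, p.1 ∈ vs := by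
    intro p hp
    rw [hscored] at hp
    rcases List.mem_map.mp hp with ⟨e, he, rfl⟩
    have hpos : 0 < sc e := by
      have := List.of_mem_filter he
      simpa using this
    have hle := (pv_score_nonneg_le terms e).2
    rw [hvs, PySem.List.mem_pyRange_neg_one]
    exact ⟨hpos, hle⟩
  rw [pv_sorted_eq_buckets scored _ hdesc hmem, ← pv_slice_map, List.map_flatMap]
  -- bucket by bucket, A's projected bucket is B's scan
  congr 1
  apply List.flatMap_congr
  intro s hsv
  have hspos : 0 < s := ((PySem.List.mem_pyRange_neg_one).mp (hvs ▸ hsv)).1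
  exact pv_bucket_eq_select sc s hspos kbEntries
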